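-- pv_equiv track=rewrite | github.com/Sheng15/MedAnnotation | meshTree.py | meshDict
-- ===== SOURCE A (Python) =====
-- def meshDict(tokens):
-- 	'''
-- 	create a dict object of mesh tree, some term in the tree might have multiple tree id
-- 	for example {"term1":["treeid1","treeid2","treeid3"]}
-- 	Parameters
-- 	• tokens - the tokens read from meshtree file
-- 	retruns a dict, keys are the terms in mesh with their treeids as value
-- 	'''
-- 	dic = {}
--
-- 	for token in tokens:
-- 		current_id = []
-- 		token_str = token[0]
-- 		token_id = token[1]
-- 		if (token_str not in dic.keys()):
-- 			current_id.append(token_id)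
-- 			dic[token_str] = current_id
-- 		else:
-- 			dic[token_str].extend([token_id])
-- 			dic[token_str] = dic[token_str]
-- 	return dic
-- ===== SOURCE B (Python) =====
-- def meshDict(tokens):
-- 	'''Group tree ids by term: collect the distinct terms in first-occurrence
-- 	order, then build each term's id list with one filtering pass.'''
-- 	terms = dict.fromkeys(t for t, _ in tokens)
-- 	return {term: [i for t, i in tokens if t == term] for term in terms}
-- ===== Notes on version B (the rewrite author's own statement) =====
-- stated objective: alternative
-- what changed: A accumulates ids in one pass with a membership test and in-place extend per token; B first computes the distinct terms in first-occurrence order (dict.fromkeys) and then builds each term's id list by a separate filtering pass over the tokens.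
import Mathlib
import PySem

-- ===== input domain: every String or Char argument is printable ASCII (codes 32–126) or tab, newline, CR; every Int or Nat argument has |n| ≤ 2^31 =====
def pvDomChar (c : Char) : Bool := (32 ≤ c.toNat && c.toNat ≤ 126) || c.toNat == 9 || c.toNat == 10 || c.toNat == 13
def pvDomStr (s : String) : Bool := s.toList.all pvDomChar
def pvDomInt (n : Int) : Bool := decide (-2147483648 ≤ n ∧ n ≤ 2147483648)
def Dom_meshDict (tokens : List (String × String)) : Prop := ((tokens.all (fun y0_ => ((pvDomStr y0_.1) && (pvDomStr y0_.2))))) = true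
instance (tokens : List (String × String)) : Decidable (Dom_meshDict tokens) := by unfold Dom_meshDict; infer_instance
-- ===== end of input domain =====

-- B groups ids by a distinct-terms pass plus per-term filtering instead of A's single accumulating loop; alternative decomposition, same result.

-- ===== PORT A =====
def meshDict (tokens : List (String × String)) : List (String × List String) :=
  (tokens.foldl (fun dic token =>
      let current_id : List String := []
      let token_str := token.1
      let token_id := token.2
      if ¬ (dic.contains token_str) then
        dic.insert token_str (current_id ++ [token_id])
      else
        -- dic[token_str].extend([token_id]); dic[token_str] = dic[token_str]
        dic.modify token_str [] (fun v => v ++ [token_id])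
    ) PySem.Dict.empty).items

-- ===== PORT B =====
def meshDict_alt (tokens : List (String × String)) : List (String × List String) :=
  (PySem.List.dedup (tokens.map (fun p => p.1))).map
    (fun term => (term, (tokens.filter (fun p => p.1 == term)).map (fun p => p.2)))

-- ===== PRECONDITION & SPEC =====
def Spec_meshDict (tokens : List (String × String)) (out : List (String × List String)) : Prop := out = meshDict_alt tokens
instance (tokens : List (String × String)) (out : List (String × List String)) : Decidable (Spec_meshDict tokens out) := by unfold Spec_meshDict; infer_instance

-- ===== CLAIM (what is proved, stated in full; the proofs are below) =====
def Claim_equal_meshDict : Prop := ∀ (tokens : List (String × String)), Dom_meshDict tokens → Spec_meshDict tokens (meshDict tokens)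

-- ===== LEMMAS AND PROOFS =====

-- A's step function is the grouping modify on every token: on a fresh key,
-- insert with [tid] is exactly modify with default [].
theorem meshDict_step_eq (dic : PySem.Dict String (List String)) (token : String × String) :
    (if ¬ (dic.contains token.1) then
        dic.insert token.1 (([] : List String) ++ [token.2])
      else dic.modify token.1 [] (fun v => v ++ [token.2]))
    = dic.modify token.1 [] (fun v => v ++ [token.2]) := by
  by_cases h : dic.contains token.1
  · simp [h]
  · rw [if_pos (by simpa using h)]
    simp only [PySem.Dict.modify]
    rw [PySem.Dict.getD_of_not_contains (h := by simpa using h)]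

theorem meshDict_foldl_eq (tokens : List (String × String)) :
    meshDict tokens
      = (tokens.foldl (fun d p => d.modify p.1 [] (fun v => v ++ [p.2])) PySem.Dict.empty).items := by
  unfold meshDict
  congr 1
  apply PySem.List.foldl_congr_mem
  intro d p _
  simpa using meshDict_step_eq d p

-- ===== VERDICT (by name: the statement is the Claim_ definition above) =====
theorem meshDict_spec : Claim_equal_meshDict := by
  intro tokens _
  show meshDict tokens = meshDict_alt tokens
  rw [meshDict_foldl_eq]
  set d := tokens.foldl (fun d p => d.modify p.1 [] (fun v => v ++ [p.2])) PySem.Dict.empty with hd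
  have hnd : d.keys.Nodup := by
    simpa [hd] using PySem.Dict.nodup_keys_foldl_modify_key tokens (fun p => p.1)
      [] (fun d p v => v ++ [p.2]) PySem.Dict.empty (by simp)
  have hkeys : d.keys = PySem.List.dedup (tokens.map (fun p => p.1)) := by
    rw [hd]
    rw [PySem.Dict.keys_foldl_modify_key]
    simp [PySem.Dict.keys_empty, PySem.Set.update_nil_left, PySem.List.dedup_eq_ofList]
  have hitems := PySem.Dict.items_eq_map_keys d hnd ([] : List String)
  rw [hitems, hkeys]
  unfold meshDict_alt
  apply List.map_congr_left
  intro term _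
  have hg : d.getD term [] = (tokens.filter (fun p => p.1 == term)).map (fun p => p.2) := by
    rw [hd]
    simpa using PySem.Dict.getD_foldl_modify_append tokens PySem.Dict.empty term
  simp [hg]
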